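-- pv_equiv track=rewrite | github.com/rspraneeth/DSA-and-others | modularArithmetic.py | numModulusP
-- ===== SOURCE A (Python) =====
-- def numModulusP(arr, p):
--     """optimized code O(n), using carry forward approach from R->l. refer scaler notes when not clear."""
--     n = len(arr)
--     ans = 0
--     exp = 1
--     for i in range(n-1, -1, -1):
--         ans = ans + (arr[i] * exp) % p
--         exp = (exp * 10) % p
--         ans = ans % p
--
--     return ans
-- ===== SOURCE B (Python) =====
-- def numModulusP(arr, p):
--     """Horner's method, left-to-right: single running remainder, no power accumulator."""
--     ans = 0
--     for d in arr:
--         ans = (ans * 10 + d) % p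
--     return ans
-- ===== Notes on version B (the rewrite author's own statement) =====
-- stated objective: idiomatic
-- what changed: Replaced the right-to-left weighted-sum loop with a running power-of-ten accumulator by forward Horner's method (ans = (ans*10 + d) % p), dropping the exp variable and reversing the traversal (one % per digit instead of three).
-- outside the precondition, e.g. on numModulusP([], 0): A returns 0, B returns 0
import Mathlib
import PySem

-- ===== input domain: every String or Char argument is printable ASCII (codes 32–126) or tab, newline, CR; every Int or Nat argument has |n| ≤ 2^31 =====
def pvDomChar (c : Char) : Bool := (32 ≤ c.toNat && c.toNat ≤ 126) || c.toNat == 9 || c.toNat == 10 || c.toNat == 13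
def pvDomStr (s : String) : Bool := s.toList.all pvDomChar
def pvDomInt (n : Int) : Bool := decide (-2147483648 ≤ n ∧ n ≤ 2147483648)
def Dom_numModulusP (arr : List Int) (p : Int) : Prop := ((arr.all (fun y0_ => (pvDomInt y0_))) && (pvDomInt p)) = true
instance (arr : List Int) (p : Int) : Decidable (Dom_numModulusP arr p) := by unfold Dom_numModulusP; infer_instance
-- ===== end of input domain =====

-- B computes the same digit-array remainder by forward Horner's method (single running
-- remainder, no power-of-ten accumulator, left-to-right) instead of A's right-to-left
-- weighted sum; same O(n) pass with simpler state and fewer '%' operations per digit.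


-- ===== PORT A =====
-- arr[i] is ported with pyGetD (default 0): the loop only produces indices 0 ≤ i < len(arr),
-- so the default is never used and the port is exact.
def numModulusP (arr : List Int) (p : Int) : Int :=
  let n : Int := PySem.List.len arr
  let s := (PySem.List.pyRange (n - 1) (-1) (-1)).foldl
    (fun (s : Int × Int) i =>
      let ans := s.1 + PySem.Int.mod (PySem.List.pyGetD arr i 0 * s.2) p
      let exp := PySem.Int.mod (s.2 * 10) p
      let ans := PySem.Int.mod ans p
      (ans, exp)) (0, 1)
  s.1

-- ===== PORT B =====
def numModulusP_alt (arr : List Int) (p : Int) : Int :=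
  arr.foldl (fun ans d => PySem.Int.mod (ans * 10 + d) p) 0

-- ===== PRECONDITION & SPEC =====
-- Pre_ excludes p = 0, on which the Python '%' raises ZeroDivisionError in both A and B
-- whenever arr is nonempty (on the single corner ([], 0) neither loop runs and both return 0).
def Pre_numModulusP (arr : List Int) (p : Int) : Prop := p ≠ 0
instance (arr : List Int) (p : Int) : Decidable (Pre_numModulusP arr p) := by unfold Pre_numModulusP; infer_instance
def pvWitness_numModulusP : List Int × Int := ([1, 2, 3], 7)

def Spec_numModulusP (arr : List Int) (p : Int) (out : Int) : Prop := out = numModulusP_alt arr p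
instance (arr : List Int) (p : Int) (out : Int) : Decidable (Spec_numModulusP arr p out) := by unfold Spec_numModulusP; infer_instance

-- ===== CLAIM (what is proved, stated in full; the proofs are below) =====
def Claim_equal_numModulusP : Prop := ∀ (arr : List Int) (p : Int), Dom_numModulusP arr p → Pre_numModulusP arr p → Spec_numModulusP arr p (numModulusP arr p)

-- ===== LEMMAS AND PROOFS =====

-- r lies in the range of Python's `% p` results (sign of the divisor)
def pvRange (p r : Int) : Prop := (0 < p ∧ 0 ≤ r ∧ r < p) ∨ (p < 0 ∧ p < r ∧ r ≤ 0)

lemma pvRange_mod (p a : Int) (hp : p ≠ 0) : pvRange p (PySem.Int.mod a p) := by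
  rcases lt_or_gt_of_ne hp with h | h
  · exact Or.inr ⟨h, (PySem.Int.mod_neg_bounds a h).1, (PySem.Int.mod_neg_bounds a h).2⟩
  · exact Or.inl ⟨h, PySem.Int.mod_nonneg a h, PySem.Int.mod_lt a h⟩

lemma pvMod_dvd (p a : Int) : p ∣ (a - PySem.Int.mod a p) :=
  ⟨PySem.Int.floordiv a p, by have := PySem.Int.floordiv_mul_add_mod a p; linarith⟩

lemma pvRange_unique {p r s : Int} (hr : pvRange p r) (hs : pvRange p s)
    (h : p ∣ (r - s)) : r = s := by
  have h0 : r - s = 0 := by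
    apply Int.eq_zero_of_abs_lt_dvd ((abs_dvd p (r - s)).mpr h)
    rcases hr with ⟨hp, h1, h2⟩ | ⟨hp, h1, h2⟩ <;>
      rcases hs with ⟨hp', h3, h4⟩ | ⟨hp', h3, h4⟩ <;>
      rw [abs_lt] <;> first | omega | (rw [abs_of_pos hp]; omega) | (rw [abs_of_neg hp]; omega)
  omega

-- value of the digit list, most-significant first (Horner form)
def pvVal (a : Int) (l : List Int) : Int := l.foldl (fun v d => v * 10 + d) a

-- value of the digit list, LEAST-significant first (A consumes the list reversed)
def pvValR (l : List Int) : Int := l.foldr (fun d acc => d + 10 * acc) 0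

lemma pvValR_reverse (l : List Int) : pvValR l.reverse = pvVal 0 l := by
  unfold pvValR pvVal
  rw [List.foldr_reverse]
  have h : (fun (x : Int) (y : Int) => y + 10 * x) = (fun v d => v * 10 + d) := by
    funext x y; ring
  rw [h]

-- B's loop body and A's loop body (on digit values)
def pvStepB (p ans d : Int) : Int := PySem.Int.mod (ans * 10 + d) p
def pvStepA (p : Int) (s : Int × Int) (d : Int) : Int × Int :=
  (PySem.Int.mod (s.1 + PySem.Int.mod (d * s.2) p) p, PySem.Int.mod (s.2 * 10) p)

-- Horner evaluation preserves congruence of the seed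
lemma pvVal_congr (p : Int) : ∀ (u : List Int) (x y : Int), p ∣ (x - y) → p ∣ (pvVal x u - pvVal y u) := by
  intro u
  induction u with
  | nil => intro x y h; simpa [pvVal] using h
  | cons e s ihs =>
    intro x y h
    have : p ∣ ((x * 10 + e) - (y * 10 + e)) := by
      obtain ⟨k, hk⟩ := h
      exact ⟨10 * k, by linarith⟩
    simpa [pvVal, List.foldl] using ihs _ _ this

lemma pvB_inv (p : Int) (hp : p ≠ 0) :
    ∀ (l : List Int) (a : Int), l ≠ [] →
      pvRange p (l.foldl (pvStepB p) a) ∧ p ∣ (pvVal a l - l.foldl (pvStepB p) a) := by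
  intro l
  induction l with
  | nil => intro a h; exact absurd rfl h
  | cons d t ih =>
    intro a _
    rcases eq_or_ne t [] with ht | ht
    · subst ht
      refine ⟨pvRange_mod p _ hp, ?_⟩
      simpa [pvVal, pvStepB, List.foldl] using pvMod_dvd p (a * 10 + d)
    · have h := ih (pvStepB p a d) ht
      refine ⟨by simpa [List.foldl] using h.1, ?_⟩
      have h2 : p ∣ (pvVal (pvStepB p a d) t - t.foldl (pvStepB p) (pvStepB p a d)) := h.2
      have base : p ∣ ((a * 10 + d) - pvStepB p a d) := pvMod_dvd p (a * 10 + d)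
      have hc : p ∣ (pvVal (a * 10 + d) t - pvVal (pvStepB p a d) t) := pvVal_congr p t _ _ base
      have e1 : pvVal a (d :: t) = pvVal (a * 10 + d) t := rfl
      have e2 : (d :: t).foldl (pvStepB p) a = t.foldl (pvStepB p) (pvStepB p a d) := rfl
      obtain ⟨k1, hk1⟩ := hc
      obtain ⟨k2, hk2⟩ := h2
      exact ⟨k1 + k2, by rw [e1, e2]; linarith⟩

lemma pvA_inv (p : Int) (hp : p ≠ 0) :
    ∀ (l : List Int) (a e : Int), l ≠ [] →
      pvRange p (l.foldl (pvStepA p) (a, e)).1 ∧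
      p ∣ (a + e * pvValR l - (l.foldl (pvStepA p) (a, e)).1) := by
  intro l
  induction l with
  | nil => intro a e h; exact absurd rfl h
  | cons d t ih =>
    intro a e _
    have hstep : (d :: t).foldl (pvStepA p) (a, e) = t.foldl (pvStepA p) (pvStepA p (a, e) d) := rfl
    set a' := PySem.Int.mod (a + PySem.Int.mod (d * e) p) p with ha'
    set e' := PySem.Int.mod (e * 10) p with he'
    have hA : pvStepA p (a, e) d = (a', e') := rfl
    have hcongr_a : p ∣ ((a + d * e) - a') := by
      have h1 : p ∣ ((d * e) - PySem.Int.mod (d * e) p) := pvMod_dvd p (d * e)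
      have h2 : p ∣ ((a + PySem.Int.mod (d * e) p) - a') := pvMod_dvd p _
      obtain ⟨k1, hk1⟩ := h1; obtain ⟨k2, hk2⟩ := h2
      exact ⟨k1 + k2, by linarith⟩
    have hcongr_e : p ∣ ((e * 10) - e') := pvMod_dvd p (e * 10)
    rcases eq_or_ne t [] with ht | ht
    · subst ht
      rw [hstep, hA]
      refine ⟨pvRange_mod p _ hp, ?_⟩
      simpa [pvValR, List.foldl] using (by
        obtain ⟨k, hk⟩ := hcongr_a
        exact ⟨k, by linarith⟩ : p ∣ (a + e * (d + 10 * 0) - a'))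
    · have h := ih a' e' ht
      rw [hstep, hA]
      refine ⟨h.1, ?_⟩
      have h2 : p ∣ (a' + e' * pvValR t - (t.foldl (pvStepA p) (a', e')).1) := h.2
      have h3 : p ∣ ((e * 10) * pvValR t - e' * pvValR t) := by
        obtain ⟨k, hk⟩ := hcongr_e
        refine ⟨k * pvValR t, ?_⟩
        have hrw : e * 10 * pvValR t - e' * pvValR t = (e * 10 - e') * pvValR t := by ring
        rw [hrw, hk]; ring
      obtain ⟨k1, hk1⟩ := hcongr_a
      obtain ⟨k3, hk3⟩ := h3
      obtain ⟨k2, hk2⟩ := h2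
      refine ⟨k1 + k3 + k2, ?_⟩
      have hv : pvValR (d :: t) = d + 10 * pvValR t := rfl
      rw [hv]
      ring_nf
      ring_nf at hk1 hk2 hk3
      linarith
    
-- A's fold over the reversed index range is the fold over arr.reverse of the values
lemma pvA_as_values (arr : List Int) (p : Int) :
    numModulusP arr p = (arr.reverse.foldl (pvStepA p) ((0 : Int), (1 : Int))).1 := by
  have h1 : PySem.List.pyRange (PySem.List.len arr - 1) (-1) (-1)
      = (PySem.List.pyRange 0 (PySem.List.len arr)).reverse := by
    have := PySem.List.pyRange_neg_one_eq_reverse (PySem.List.len arr - 1) (-1)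
    simpa using this
  have h2 : ∀ (L : List Int) (s : Int × Int),
      L.foldl (fun (s : Int × Int) i =>
        (PySem.Int.mod (s.1 + PySem.Int.mod (PySem.List.pyGetD arr i 0 * s.2) p) p,
         PySem.Int.mod (s.2 * 10) p)) s
      = (L.map (fun i => PySem.List.pyGetD arr i 0)).foldl (pvStepA p) s := by
    intro L
    induction L with
    | nil => intro s; rfl
    | cons x t iht => intro s; simp [List.foldl, List.map, iht, pvStepA]
  have h3 : ((PySem.List.pyRange 0 (PySem.List.len arr)).reverse.map
      (fun i => PySem.List.pyGetD arr i 0)) = arr.reverse := by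
    rw [List.map_reverse]
    have h := PySem.List.map_pyGetD_pyRange arr 0 (a := 0) le_rfl
    rw [h]
    simp
  simp only [numModulusP]
  simp only [h1, h2, h3]

lemma pvB_as_fold (arr : List Int) (p : Int) :
    numModulusP_alt arr p = arr.foldl (pvStepB p) 0 := rfl

-- ===== VERDICT (by name: the statement is the Claim_ definition above) =====
theorem numModulusP_spec : Claim_equal_numModulusP := by
  intro arr p _ hp
  unfold Spec_numModulusP
  rcases eq_or_ne arr [] with h | h
  · subst h; rfl
  · have hrev : arr.reverse ≠ [] := by simpa using h
    have hA := pvA_inv p hp arr.reverse 0 1 hrev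
    have hB := pvB_inv p hp arr 0 h
    rw [pvA_as_values, pvB_as_fold]
    apply pvRange_unique hA.1 hB.1
    have hval : (0 : Int) + 1 * pvValR arr.reverse = pvVal 0 arr := by
      rw [pvValR_reverse]; ring
    obtain ⟨k1, hk1⟩ := hA.2
    obtain ⟨k2, hk2⟩ := hB.2
    rw [hval] at hk1
    exact ⟨k2 - k1, by linarith⟩
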